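-- pv_equiv track=rewrite | github.com/YU-Kawasaki-05/AtCoder_learn | AtCoder_Training/09補足_幅優先探索入門.py | maze_with_key
-- ===== SOURCE A (Python) =====
-- from collections import deque
--
-- def maze_with_key(grid, start, goal, key_pos):
--     """
--     鍵を拾ってドアを開ける必要がある迷路のBFS
--
--     Parameters:
--     - grid: グリッド（'.'=通路, '#'=壁, 'D'=ドア）
--     - key_pos: 鍵の位置 (y, x)
--
--     Returns:
--     - 最短距離
--     """
--     H, W = len(grid), len(grid[0])
--     # 状態: (y, x, has_key)
--     # has_key: 0=鍵なし, 1=鍵あり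
--
--     # 訪問状態を記録（3次元配列）
--     dist = [[[-1, -1] for _ in range(W)] for _ in range(H)]
--
--     queue = deque([(start[0], start[1], 0)])  # スタート時点では鍵を持っていない
--     dist[start[0]][start[1]][0] = 0
--
--     directions = [(-1, 0), (1, 0), (0, -1), (0, 1)]
--
--     while queue:
--         y, x, has_key = queue.popleft()
--
--         # ゴールに到達したら終了
--         if (y, x) == goal:
--             return dist[y][x][has_key]
--
--         for dy, dx in directions:
--             ny, nx = y + dy, x + dx
--
--             # グリッド外なら無視
--             if not (0 <= ny < H and 0 <= nx < W):
--                 continue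
--
--             new_has_key = has_key
--
--             # 鍵を拾った場合
--             if (ny, nx) == key_pos:
--                 new_has_key = 1
--
--             # ドアは鍵を持っていないと通れない
--             if grid[ny][nx] == 'D' and new_has_key == 0:
--                 continue
--
--             # 壁は通れない
--             if grid[ny][nx] == '#':
--                 continue
--
--             # 未訪問の状態なら訪問
--             if dist[ny][nx][new_has_key] == -1:
--                 dist[ny][nx][new_has_key] = dist[y][x][has_key] + 1
--                 queue.append((ny, nx, new_has_key))
--
--     return -1
-- ===== SOURCE B (Python) =====
-- def maze_with_key(grid, start, goal, key_pos):
--     """Fixpoint saturation instead of BFS: keep an H x W x 2 boolean table of states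
--     (y, x, has_key) reachable within d steps, and each round sweep the WHOLE grid,
--     expanding every reachable state at once (no queue, no frontier, no distances);
--     return d when the goal cell becomes reachable, -1 when the table stops changing."""
--     H, W = len(grid), len(grid[0])
--     reach = [[[False, False] for _ in range(W)] for _ in range(H)]
--     reach[start[0]][start[1]][0] = True
--     d = 0
--     while True:
--         if any((y, x) == goal and (reach[y][x][0] or reach[y][x][1])
--                for y in range(H) for x in range(W)):
--             return d
--         nxt = [[cell[:] for cell in row] for row in reach]
--         changed = False
--         for y in range(H):
--             for x in range(W):
--                 for k in (0, 1):
--                     if not reach[y][x][k]: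
--                         continue
--                     for ny, nx in ((y - 1, x), (y + 1, x), (y, x - 1), (y, x + 1)):
--                         if not (0 <= ny < H and 0 <= nx < W):
--                             continue
--                         nk = 1 if (ny, nx) == key_pos else k
--                         c = grid[ny][nx]
--                         if c != '#' and not (c == 'D' and nk == 0):
--                             if not nxt[ny][nx][nk]:
--                                 nxt[ny][nx][nk] = True
--                                 changed = True
--         if not changed:
--             return -1
--         reach = nxt
--         d += 1
-- ===== Notes on version B (the rewrite author's own statement) =====
-- stated objective: alternative
-- what changed: A's BFS (deque of states, per-state distance array, early return on pop) is replaced by fixpoint saturation: an H x W x 2 boolean table of reachable (y, x, has_key) states is re-expanded by whole-grid sweeps with a single round counter, stopping when the goal cell becomes reachable or the table stops changing; there is no queue, no frontier and no stored distance.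
-- outside the precondition, e.g. on maze_with_key(['..', '..'], (-1, 0), (1, 0), (9, 9)): A returns -1, B returns 0
import Mathlib
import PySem

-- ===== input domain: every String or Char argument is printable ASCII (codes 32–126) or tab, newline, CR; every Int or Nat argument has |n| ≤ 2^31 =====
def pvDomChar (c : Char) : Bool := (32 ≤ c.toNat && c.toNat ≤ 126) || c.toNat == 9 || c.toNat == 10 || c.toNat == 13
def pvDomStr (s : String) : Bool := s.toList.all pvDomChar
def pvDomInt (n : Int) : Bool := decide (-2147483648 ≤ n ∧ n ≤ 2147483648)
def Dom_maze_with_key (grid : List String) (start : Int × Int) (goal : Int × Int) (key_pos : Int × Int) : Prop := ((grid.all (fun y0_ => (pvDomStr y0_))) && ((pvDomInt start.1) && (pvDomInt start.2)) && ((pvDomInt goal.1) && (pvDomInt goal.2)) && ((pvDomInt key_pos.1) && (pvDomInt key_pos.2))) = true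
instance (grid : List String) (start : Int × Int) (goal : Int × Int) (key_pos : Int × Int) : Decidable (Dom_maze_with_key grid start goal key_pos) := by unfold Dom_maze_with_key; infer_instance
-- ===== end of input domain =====

-- B replaces A's queue BFS (deque + per-state distance array + early return on pop) by
-- fixpoint saturation: an H×W×2 boolean table of reachable (y, x, has_key) states is
-- re-expanded by whole-grid sweeps with a single round counter, until the goal cell
-- becomes reachable or the table stops changing — no queue, no frontier, no distances;
-- proved to return the same value as A on every input Pre_ admits.

-- ===== PORT A =====
-- Python list indexing dist[i] for -n ≤ i < n (negative indices count from the end);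
-- exact on that range, which Pre_ guarantees for every dist access
def pvNormA (i n : Int) : Int := if i < 0 then i + n else i

-- grid[ny][nx]; exact whenever 0 ≤ ny < len(grid) and 0 ≤ nx < row length, which Pre_
-- (rows reaching width W) guarantees at every use; the ' ' default is never reached there.
def pvCellA (grid : List String) (ny nx : Int) : Char :=
  (PySem.Str.pyGet? ((PySem.List.pyGet? grid ny).getD "") nx).getD ' '

def pvDirsA : List (Int × Int) := [(-1, 0), (1, 0), (0, -1), (0, 1)]

-- the body of A's inner `for dy, dx in directions` loop, acting on (queue-after-pop, dist);
-- dist is A's -1-initialized 3D array ported as a map with default -1 (exact for the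
-- in-range indices A uses inside Pre_)
def pvStepA (grid : List String) (key_pos : Int × Int) (H W y x k : Int)
    (acc : List (Int × Int × Int) × PySem.Dict (Int × Int × Int) Int) (dd : Int × Int) :
    List (Int × Int × Int) × PySem.Dict (Int × Int × Int) Int :=
  let ny := y + dd.1
  let nx := x + dd.2
  if 0 ≤ ny ∧ ny < H ∧ 0 ≤ nx ∧ nx < W then
    let nk : Int := if (ny, nx) = key_pos then 1 else k
    if pvCellA grid ny nx = 'D' ∧ nk = 0 then acc
    else if pvCellA grid ny nx = '#' then acc
    else if acc.2.getD (pvNormA ny H, pvNormA nx W, nk) (-1) = -1 then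
      (acc.1 ++ [(ny, nx, nk)],
       acc.2.insert (pvNormA ny H, pvNormA nx W, nk)
         (acc.2.getD (pvNormA y H, pvNormA x W, k) (-1) + 1))
    else acc
  else acc

-- A's `while queue` loop; the fuel only makes the recursion structural and is provably
-- never exhausted inside Pre_ (each enqueue marks a fresh one of the ≤ 2·H·W states)
def pvLoopA (grid : List String) (goal key_pos : Int × Int) (H W : Int) :
    Nat → List (Int × Int × Int) → PySem.Dict (Int × Int × Int) Int → Int
  | _, [], _ => -1
  | 0, _ :: _, _ => -1
  | fuel + 1, (y, x, k) :: rest, dist =>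
    if (y, x) = goal then dist.getD (pvNormA y H, pvNormA x W, k) (-1)
    else
      let r := pvDirsA.foldl (pvStepA grid key_pos H W y x k) (rest, dist)
      pvLoopA grid goal key_pos H W fuel r.1 r.2

def maze_with_key (grid : List String) (start : Int × Int) (goal : Int × Int) (key_pos : Int × Int) : Int :=
  let H : Int := grid.length
  let W : Int := (grid.headD "").length
  let s0 : Int × Int × Int := (start.1, start.2, 0)
  pvLoopA grid goal key_pos H W (4 * grid.length * (grid.headD "").length + 2)
    [s0] ((PySem.Dict.empty : PySem.Dict (Int × Int × Int) Int).insert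
      (pvNormA start.1 H, pvNormA start.2 W, 0) 0)

-- ===== PORT B =====
-- grid[ny][nx], as in A's port (exact inside Pre_)
def pvCellB (grid : List String) (ny nx : Int) : Char :=
  (PySem.Str.pyGet? ((PySem.List.pyGet? grid ny).getD "") nx).getD ' '

def pvDirsB : List (Int × Int) := [(-1, 0), (1, 0), (0, -1), (0, 1)]

-- one neighbour of the reachable state (y, x, k): mark it in nxt if passable and unmarked;
-- B's H×W×2 boolean table is ported as a map with default False (exact for the in-range
-- indices B uses inside Pre_); the Bool in the pair is B's `changed` flag
def pvTryB (grid : List String) (key_pos : Int × Int) (H W y x k : Int)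
    (acc : PySem.Dict (Int × Int × Int) Bool × Bool) (dd : Int × Int) :
    PySem.Dict (Int × Int × Int) Bool × Bool :=
  let ny := y + dd.1
  let nx := x + dd.2
  if 0 ≤ ny ∧ ny < H ∧ 0 ≤ nx ∧ nx < W then
    let nk : Int := if (ny, nx) = key_pos then 1 else k
    let c := pvCellB grid ny nx
    if c ≠ '#' ∧ ¬(c = 'D' ∧ nk = 0) then
      if acc.1.getD (ny, nx, nk) false = false then (acc.1.insert (ny, nx, nk) true, true)
      else acc
    else acc
  else acc

-- the body of B's sweep at one cell-state: expand it only if currently reachable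
def pvVisitB (grid : List String) (key_pos : Int × Int) (H W : Int)
    (rb : PySem.Dict (Int × Int × Int) Bool)
    (acc : PySem.Dict (Int × Int × Int) Bool × Bool) (y x k : Int) :
    PySem.Dict (Int × Int × Int) Bool × Bool :=
  if rb.getD (y, x, k) false = true then pvDirsB.foldl (pvTryB grid key_pos H W y x k) acc
  else acc

-- one whole-grid sweep: nxt starts as a copy of reach, changed starts False
def pvSweepB (grid : List String) (key_pos : Int × Int) (H W : Int)
    (rb : PySem.Dict (Int × Int × Int) Bool) :
    PySem.Dict (Int × Int × Int) Bool × Bool :=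
  (PySem.List.pyRange 0 H 1).foldl (fun acc y =>
    (PySem.List.pyRange 0 W 1).foldl (fun acc x =>
      ([0, 1] : List Int).foldl (fun acc k => pvVisitB grid key_pos H W rb acc y x k) acc)
      acc) (rb, false)

-- B's per-round goal test: some reachable state sits on the goal cell
def pvGoalHitB (goal : Int × Int) (H W : Int)
    (rb : PySem.Dict (Int × Int × Int) Bool) : Bool :=
  (PySem.List.pyRange 0 H 1).any (fun y => (PySem.List.pyRange 0 W 1).any (fun x =>
    decide ((y, x) = goal) && (rb.getD (y, x, 0) false || rb.getD (y, x, 1) false)))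

-- B's `while True` loop; fuel only makes it structural (every kept round marks a fresh
-- one of the ≤ 2·H·W states, provably inside Pre_)
def pvLoopB (grid : List String) (goal key_pos : Int × Int) (H W : Int) :
    Nat → PySem.Dict (Int × Int × Int) Bool → Int → Int
  | 0, _, _ => -1
  | fuel + 1, rb, d =>
    if pvGoalHitB goal H W rb then d
    else
      let r := pvSweepB grid key_pos H W rb
      if r.2 = false then -1
      else pvLoopB grid goal key_pos H W fuel r.1 (d + 1)

def maze_with_key_alt (grid : List String) (start : Int × Int) (goal : Int × Int) (key_pos : Int × Int) : Int :=
  let H : Int := grid.length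
  let W : Int := (grid.headD "").length
  pvLoopB grid goal key_pos H W (2 * grid.length * (grid.headD "").length + 2)
    ((PySem.Dict.empty : PySem.Dict (Int × Int × Int) Bool).insert
      (pvNormA start.1 H, pvNormA start.2 W, 0) true) 0

-- ===== PRECONDITION & SPEC =====
-- Pre_ admits a nonempty grid whose rows all reach the width W = len(grid[0]) that A
-- indexes (outside that A raises IndexError on an empty/ragged grid or an out-of-range
-- start) and any start index Python accepts; for a NEGATIVE (wrapped) start index it
-- additionally requires the goal to lie outside the grid box and off the start:
-- a wrapped start with an in-grid goal is excluded because there Python's negative list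
-- indexing makes A's start state share its visited cell with (start+H, start+W) while the
-- goal comparison stays raw — an aliasing artefact of A's dist array that no natural
-- re-implementation reproduces (see the cite in claim.json).
def Pre_maze_with_key (grid : List String) (start : Int × Int) (goal : Int × Int) (key_pos : Int × Int) : Prop :=
  0 < grid.length ∧ 0 < (grid.headD "").length ∧
  (∀ r ∈ grid, (grid.headD "").length ≤ r.length) ∧
  -(grid.length : Int) ≤ start.1 ∧ start.1 < (grid.length : Int) ∧
  -((grid.headD "").length : Int) ≤ start.2 ∧ start.2 < ((grid.headD "").length : Int) ∧
  ((0 ≤ start.1 ∧ 0 ≤ start.2) ∨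
    (¬(0 ≤ goal.1 ∧ goal.1 < (grid.length : Int) ∧ 0 ≤ goal.2 ∧
        goal.2 < ((grid.headD "").length : Int)) ∧ goal ≠ start))

instance (grid : List String) (start : Int × Int) (goal : Int × Int) (key_pos : Int × Int) : Decidable (Pre_maze_with_key grid start goal key_pos) := by unfold Pre_maze_with_key; infer_instance

def pvWitness_maze_with_key : List String × (Int × Int) × (Int × Int) × (Int × Int) :=
  (["..D", "#..", ".k."], (0, 0), (2, 2), (2, 1))

def Spec_maze_with_key (grid : List String) (start : Int × Int) (goal : Int × Int) (key_pos : Int × Int) (out : Int) : Prop := out = maze_with_key_alt grid start goal key_pos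
instance (grid : List String) (start : Int × Int) (goal : Int × Int) (key_pos : Int × Int) (out : Int) : Decidable (Spec_maze_with_key grid start goal key_pos out) := by unfold Spec_maze_with_key; infer_instance

-- ===== CLAIM (what is proved, stated in full; the proofs are below) =====
def Claim_equal_maze_with_key : Prop := ∀ (grid : List String) (start : Int × Int) (goal : Int × Int) (key_pos : Int × Int), Dom_maze_with_key grid start goal key_pos → Pre_maze_with_key grid start goal key_pos → Spec_maze_with_key grid start goal key_pos (maze_with_key grid start goal key_pos)

-- ===== LEMMAS AND PROOFS =====

-- the common move relation: `pvMove s dd = some t` iff both programs let the step s → t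
def pvMove (grid : List String) (key_pos : Int × Int) (H W : Int)
    (s : Int × Int × Int) (dd : Int × Int) : Option (Int × Int × Int) :=
  let ny := s.1 + dd.1
  let nx := s.2.1 + dd.2
  if 0 ≤ ny ∧ ny < H ∧ 0 ≤ nx ∧ nx < W then
    let nk : Int := if (ny, nx) = key_pos then 1 else s.2.2
    if pvCellA grid ny nx = 'D' ∧ nk = 0 then none
    else if pvCellA grid ny nx = '#' then none
    else some (ny, nx, nk)
  else none

def pvInBox (H W : Int) (s : Int × Int × Int) : Prop :=
  0 ≤ s.1 ∧ s.1 < H ∧ 0 ≤ s.2.1 ∧ s.2.1 < W ∧ (s.2.2 = 0 ∨ s.2.2 = 1)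

-- all 2·H·W states (y, x, has_key) of the maze
def pvBox (H W : Int) : List (Int × Int × Int) :=
  (List.range H.toNat).flatMap (fun (y : Nat) =>
    (List.range W.toNat).flatMap (fun (x : Nat) =>
      [((y : Int), (x : Int), (0 : Int)), ((y : Int), (x : Int), (1 : Int))]))

-- number of still-unvisited states: the termination/fuel measure
def pvFresh (H W : Int) (dist : PySem.Dict (Int × Int × Int) Int) : Nat :=
  (pvBox H W).countP (fun t => dist.getD t (-1) == -1)

lemma pvNorm_id (i n : Int) (h : 0 ≤ i) : pvNormA i n = i := by
  unfold pvNormA; rw [if_neg (by omega)]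

lemma pv_mem_box {H W y x k : Int} (hy0 : 0 ≤ y) (hyH : y < H) (hx0 : 0 ≤ x) (hxW : x < W)
    (hk : k = 0 ∨ k = 1) : (y, x, k) ∈ pvBox H W := by
  have h1 : y.toNat ∈ List.range H.toNat := List.mem_range.mpr (by omega)
  have h2 : x.toNat ∈ List.range W.toNat := List.mem_range.mpr (by omega)
  have h3 : (y, x, k) ∈ [((y.toNat : Int), (x.toNat : Int), (0 : Int)),
      ((y.toNat : Int), (x.toNat : Int), (1 : Int))] := by
    rcases hk with h | h <;>
      simp [h, Int.toNat_of_nonneg hy0, Int.toNat_of_nonneg hx0]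
  unfold pvBox
  exact List.mem_flatMap.mpr ⟨y.toNat, h1, List.mem_flatMap.mpr ⟨x.toNat, h2, h3⟩⟩

lemma pv_box_length (H W : Int) : (pvBox H W).length = 2 * (H.toNat * W.toNat) := by
  simp [pvBox, List.length_flatMap]
  ring

lemma pv_countP_mono {α : Type} (l : List α) (p q : α → Bool)
    (hmono : ∀ x ∈ l, q x = true → p x = true) : l.countP q ≤ l.countP p := by
  induction l with
  | nil => simp
  | cons a l ih =>
    have h1 : q a = true → p a = true := hmono a (by simp)
    have ihl := ih (fun x hx h => hmono x (by simp [hx]) h)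
    rw [List.countP_cons, List.countP_cons]
    cases hqa : q a
    · cases hpa : p a <;> simp <;> omega
    · rw [h1 hqa]; simp; omega

lemma pv_countP_lt {α : Type} (l : List α) (p q : α → Bool)
    (hmono : ∀ x ∈ l, q x = true → p x = true) (s : α) (hs : s ∈ l)
    (hp : p s = true) (hq : q s = false) : l.countP q < l.countP p := by
  induction l with
  | nil => cases hs
  | cons a l ih =>
    have ihm := pv_countP_mono l p q (fun x hx h => hmono x (by simp [hx]) h)
    rw [List.countP_cons, List.countP_cons]
    rcases List.mem_cons.mp hs with rfl | hs'
    · rw [hp, hq]; simpa using by omega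
    · have h1 : q a = true → p a = true := hmono a (by simp)
      have ihl := ih (fun x hx h => hmono x (by simp [hx]) h) hs'
      cases hqa : q a
      · cases hpa : p a <;> simp <;> omega
      · rw [h1 hqa]; simp; omega

lemma pvFresh_insert_lt (H W : Int) (dist : PySem.Dict (Int × Int × Int) Int)
    (t : Int × Int × Int) (v : Int) (hbox : t ∈ pvBox H W)
    (hf : dist.getD t (-1) = -1) (hv : v ≠ -1) :
    pvFresh H W (dist.insert t v) < pvFresh H W dist := by
  apply pv_countP_lt (pvBox H W) _ _ _ t hbox
  · simp [hf]
  · rw [beq_eq_false_iff_ne, PySem.Dict.getD_insert, if_pos rfl]; exact hv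
  · intro u _ hq
    rw [beq_iff_eq] at hq ⊢
    rw [PySem.Dict.getD_insert] at hq
    by_cases hts : u = t
    · rw [if_pos hts] at hq; exact absurd hq hv
    · rwa [if_neg hts] at hq

-- the target of a move is inside the box (with the popped state's key bit 0/1)
lemma pvMove_inBox {grid : List String} {key_pos : Int × Int} {H W : Int}
    {s t : Int × Int × Int} {dd : Int × Int}
    (h : pvMove grid key_pos H W s dd = some t) (hk : s.2.2 = 0 ∨ s.2.2 = 1) :
    pvInBox H W t := by
  simp only [pvMove] at h
  by_cases hb : 0 ≤ s.1 + dd.1 ∧ s.1 + dd.1 < H ∧ 0 ≤ s.2.1 + dd.2 ∧ s.2.1 + dd.2 < W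
  · rw [if_pos hb] at h
    by_cases h1 : pvCellA grid (s.1 + dd.1) (s.2.1 + dd.2) = 'D' ∧
        (if (s.1 + dd.1, s.2.1 + dd.2) = key_pos then (1 : Int) else s.2.2) = 0
    · rw [if_pos h1] at h; cases h
    · rw [if_neg h1] at h
      by_cases h2 : pvCellA grid (s.1 + dd.1) (s.2.1 + dd.2) = '#'
      · rw [if_pos h2] at h; cases h
      · rw [if_neg h2] at h
        cases h
        refine ⟨hb.1, hb.2.1, hb.2.2.1, hb.2.2.2, ?_⟩
        dsimp only
        split_ifs with hkp
        · right; rfl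
        · exact hk
  · rw [if_neg hb] at h; cases h

-- A's per-direction step, rewritten through pvMove (for a popped state with 0 ≤ y, x)
lemma pvStepA_move_none (grid : List String) (key_pos : Int × Int) (H W y x k : Int)
    (acc : List (Int × Int × Int) × PySem.Dict (Int × Int × Int) Int) (dd : Int × Int)
    (h : pvMove grid key_pos H W (y, x, k) dd = none) :
    pvStepA grid key_pos H W y x k acc dd = acc := by
  simp only [pvMove] at h
  simp only [pvStepA]
  by_cases hb : 0 ≤ y + dd.1 ∧ y + dd.1 < H ∧ 0 ≤ x + dd.2 ∧ x + dd.2 < W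
  · rw [if_pos hb] at h ⊢
    by_cases h1 : pvCellA grid (y + dd.1) (x + dd.2) = 'D' ∧
        (if (y + dd.1, x + dd.2) = key_pos then (1 : Int) else k) = 0
    · rw [if_pos h1]
    · rw [if_neg h1] at h ⊢
      by_cases h2 : pvCellA grid (y + dd.1) (x + dd.2) = '#'
      · rw [if_pos h2]
      · rw [if_neg h2] at h; cases h
  · rw [if_neg hb]

lemma pvStepA_move_some (grid : List String) (key_pos : Int × Int) (H W y x k : Int)
    (acc : List (Int × Int × Int) × PySem.Dict (Int × Int × Int) Int) (dd : Int × Int)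
    (t : Int × Int × Int)
    (h : pvMove grid key_pos H W (y, x, k) dd = some t) :
    pvStepA grid key_pos H W y x k acc dd =
      (if acc.2.getD t (-1) = -1
        then (acc.1 ++ [t],
          acc.2.insert t (acc.2.getD (pvNormA y H, pvNormA x W, k) (-1) + 1))
        else acc) := by
  simp only [pvMove] at h
  simp only [pvStepA]
  by_cases hb : 0 ≤ y + dd.1 ∧ y + dd.1 < H ∧ 0 ≤ x + dd.2 ∧ x + dd.2 < W
  · rw [if_pos hb] at h ⊢
    by_cases h1 : pvCellA grid (y + dd.1) (x + dd.2) = 'D' ∧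
        (if (y + dd.1, x + dd.2) = key_pos then (1 : Int) else k) = 0
    · rw [if_pos h1] at h; cases h
    · rw [if_neg h1] at h ⊢
      by_cases h2 : pvCellA grid (y + dd.1) (x + dd.2) = '#'
      · rw [if_pos h2] at h; cases h
      · rw [if_neg h2] at h ⊢
        cases h
        rw [pvNorm_id (y + dd.1) H (by omega), pvNorm_id (x + dd.2) W (by omega)]
  · rw [if_neg hb] at h; cases h

-- one popped state of A, expanded over a direction list: the queue grows by the fresh
-- reachable targets, each marked d+1; everything else in dist is untouched
lemma pvPop (grid : List String) (key_pos : Int × Int) (H W y x k d : Int)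
    (hk : k = 0 ∨ k = 1) (hd0 : 0 ≤ d) :
    ∀ (L : List (Int × Int)) (q : List (Int × Int × Int))
      (dist : PySem.Dict (Int × Int × Int) Int),
    dist.getD (pvNormA y H, pvNormA x W, k) (-1) = d →
    ∃ (adds : List (Int × Int × Int)) (dist₂ : PySem.Dict (Int × Int × Int) Int),
      L.foldl (pvStepA grid key_pos H W y x k) (q, dist) = (q ++ adds, dist₂) ∧
      (∀ t, dist₂.getD t (-1) = if t ∈ adds then d + 1 else dist.getD t (-1)) ∧
      (∀ t ∈ adds, dist.getD t (-1) = -1 ∧ pvInBox H W t ∧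
        ∃ dd ∈ L, pvMove grid key_pos H W (y, x, k) dd = some t) ∧
      (∀ dd ∈ L, ∀ t, pvMove grid key_pos H W (y, x, k) dd = some t →
        dist₂.getD t (-1) ≠ -1) ∧
      pvFresh H W dist₂ + adds.length ≤ pvFresh H W dist := by
  intro L
  induction L with
  | nil =>
    intro q dist hd
    exact ⟨[], dist, by simp, by simp, by simp, by simp, by simp⟩
  | cons dd L ih =>
    intro q dist hd
    rw [List.foldl_cons]
    cases hmv : pvMove grid key_pos H W (y, x, k) dd with
    | none =>
      rw [pvStepA_move_none grid key_pos H W y x k (q, dist) dd hmv]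
      obtain ⟨adds, dist₂, h1, h2, h3, h4, h5⟩ := ih q dist hd
      refine ⟨adds, dist₂, by simpa using h1, h2, ?_, ?_, h5⟩
      · intro t ht
        obtain ⟨ha, hb, dd', hdd', hm⟩ := h3 t ht
        exact ⟨ha, hb, dd', by simp [hdd'], hm⟩
      · intro dd' hdd' t hm
        rcases List.mem_cons.mp hdd' with rfl | hdd''
        · rw [hmv] at hm; cases hm
        · exact h4 dd' hdd'' t hm
    | some u =>
      rw [pvStepA_move_some grid key_pos H W y x k (q, dist) dd u hmv]
      by_cases hfu : dist.getD u (-1) = -1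
      · rw [if_pos hfu, hd]
        have hune : u ≠ (pvNormA y H, pvNormA x W, k) := by
          intro he; rw [he, hd] at hfu; omega
        have hgd₁ : ∀ t, (dist.insert u (d + 1)).getD t (-1) =
            if t = u then d + 1 else dist.getD t (-1) := by
          intro t; rw [PySem.Dict.getD_insert]
        have hd₁ : (dist.insert u (d + 1)).getD (pvNormA y H, pvNormA x W, k) (-1) = d := by
          rw [hgd₁, if_neg (fun he => hune he.symm)]; exact hd
        obtain ⟨adds, dist₂, h1, h2, h3, h4, h5⟩ := ih (q ++ [u]) (dist.insert u (d + 1)) hd₁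
        have hubox : pvInBox H W u := pvMove_inBox hmv hk
        refine ⟨u :: adds, dist₂, by rw [h1]; simp, ?_, ?_, ?_, ?_⟩
        · intro t
          rw [h2 t]
          by_cases hta : t ∈ adds
          · simp [hta]
          · rw [if_neg hta, hgd₁ t]
            by_cases htu : t = u
            · simp [htu]
            · simp [htu, hta]
        · intro t ht
          rcases List.mem_cons.mp ht with rfl | ht'
          · exact ⟨hfu, hubox, dd, by simp, hmv⟩
          · obtain ⟨ha, hb, dd', hdd', hm⟩ := h3 t ht'
            have htu : t ≠ u := by
              intro he; rw [he, hgd₁, if_pos rfl] at ha; omega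
            rw [hgd₁, if_neg htu] at ha
            exact ⟨ha, hb, dd', by simp [hdd'], hm⟩
        · intro dd' hdd' t hm
          rcases List.mem_cons.mp hdd' with rfl | hdd''
          · rw [hmv] at hm
            cases hm
            rw [h2 u]
            by_cases hua : u ∈ adds
            · simp [hua]; omega
            · rw [if_neg hua, hgd₁, if_pos rfl]; omega
          · exact h4 dd' hdd'' t hm
        · have hlt : pvFresh H W (dist.insert u (d + 1)) < pvFresh H W dist :=
            pvFresh_insert_lt H W dist u (d + 1)
              (pv_mem_box hubox.1 hubox.2.1 hubox.2.2.1 hubox.2.2.2.1 hubox.2.2.2.2)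
              hfu (by omega)
          simp only [List.length_cons]
          omega
      · rw [if_neg hfu]
        obtain ⟨adds, dist₂, h1, h2, h3, h4, h5⟩ := ih q dist hd
        refine ⟨adds, dist₂, h1, h2, ?_, ?_, h5⟩
        · intro t ht
          obtain ⟨ha, hb, dd', hdd', hm⟩ := h3 t ht
          exact ⟨ha, hb, dd', by simp [hdd'], hm⟩
        · intro dd' hdd' t hm
          rcases List.mem_cons.mp hdd' with rfl | hdd''
          · rw [hmv] at hm
            cases hm
            rw [h2 u]
            by_cases hta : u ∈ adds
            · simp [hta]; omega
            · rw [if_neg hta]; exact hfu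
          · exact h4 dd' hdd'' t hm

-- if the current layer contains a goal state, A returns d
lemma pvLayerGoal (grid : List String) (goal key_pos : Int × Int) (H W d : Int)
    (hd0 : 0 ≤ d) :
    ∀ (F N : List (Int × Int × Int)) (dist : PySem.Dict (Int × Int × Int) Int)
      (fuelA : Nat),
    (∃ g ∈ F, (g.1, g.2.1) = goal) →
    (∀ s ∈ F, pvInBox H W s ∧ dist.getD s (-1) = d) →
    F.length ≤ fuelA →
    pvLoopA grid goal key_pos H W fuelA (F ++ N) dist = d := by
  intro F
  induction F with
  | nil => intro N dist fuelA hg; simp at hg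
  | cons s F' ih =>
    intro N dist fuelA hg hF hfuel
    obtain ⟨y, x, k⟩ := s
    cases fuelA with
    | zero => simp at hfuel
    | succ fa =>
      obtain ⟨hbox, hdv⟩ := hF (y, x, k) (by simp)
      by_cases hgy : (y, x) = goal
      · have : pvLoopA grid goal key_pos H W (fa + 1) ((y, x, k) :: (F' ++ N)) dist =
            dist.getD (pvNormA y H, pvNormA x W, k) (-1) := by
          simp [pvLoopA, hgy]
        rw [List.cons_append, this, pvNorm_id y H hbox.1, pvNorm_id x W hbox.2.2.1, hdv]
      · obtain ⟨g, hgF, hgg⟩ := hg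
        have hgF' : g ∈ F' := by
          rcases List.mem_cons.mp hgF with rfl | h
          · exact absurd hgg hgy
          · exact h
        have hdvn : dist.getD (pvNormA y H, pvNormA x W, k) (-1) = d := by
          rw [pvNorm_id y H hbox.1, pvNorm_id x W hbox.2.2.1]; exact hdv
        obtain ⟨adds, dist₂, h1, h2, h3, h4, h5⟩ :=
          pvPop grid key_pos H W y x k d hbox.2.2.2.2 hd0
            pvDirsA (F' ++ N) dist hdvn
        have : pvLoopA grid goal key_pos H W (fa + 1) ((y, x, k) :: (F' ++ N)) dist =
            pvLoopA grid goal key_pos H W fa ((F' ++ N) ++ adds) dist₂ := by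
          simp [pvLoopA, hgy, h1]
        rw [List.cons_append, this, List.append_assoc]
        apply ih (N ++ adds) dist₂ fa ⟨g, hgF', hgg⟩
        · intro t ht
          obtain ⟨htb, htd⟩ := hF t (by simp [ht])
          refine ⟨htb, ?_⟩
          rw [h2 t, if_neg ?_]
          · exact htd
          · intro hta
            have := (h3 t hta).1
            omega
        · simpa using Nat.le_of_succ_le_succ (by simpa using hfuel)

-- a goal-free layer, fully expanded: A's queue advances to the next layer `adds`
lemma pvLayerStep (grid : List String) (goal key_pos : Int × Int) (H W d : Int)
    (hd0 : 0 ≤ d) :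
    ∀ (F N : List (Int × Int × Int)) (dist : PySem.Dict (Int × Int × Int) Int)
      (fuelA : Nat),
    (∀ s ∈ F, (s.1, s.2.1) ≠ goal) →
    (∀ s ∈ F, pvInBox H W s ∧ dist.getD s (-1) = d) →
    F.length ≤ fuelA →
    ∃ (adds : List (Int × Int × Int)) (dist₂ : PySem.Dict (Int × Int × Int) Int),
      pvLoopA grid goal key_pos H W fuelA (F ++ N) dist =
        pvLoopA grid goal key_pos H W (fuelA - F.length) (N ++ adds) dist₂ ∧
      (∀ t, dist₂.getD t (-1) = if t ∈ adds then d + 1 else dist.getD t (-1)) ∧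
      (∀ t ∈ adds, dist.getD t (-1) = -1 ∧ pvInBox H W t ∧
        ∃ s ∈ F, ∃ dd ∈ pvDirsA, pvMove grid key_pos H W s dd = some t) ∧
      (∀ s ∈ F, ∀ dd ∈ pvDirsA, ∀ t, pvMove grid key_pos H W s dd = some t →
        dist₂.getD t (-1) ≠ -1) ∧
      pvFresh H W dist₂ + adds.length ≤ pvFresh H W dist := by
  intro F
  induction F with
  | nil =>
    intro N dist fuelA _ _ _
    exact ⟨[], dist, by simp, by simp, by simp, by simp, by simp⟩
  | cons s F' ih =>
    intro N dist fuelA hng hF hfuel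
    obtain ⟨y, x, k⟩ := s
    cases fuelA with
    | zero => simp at hfuel
    | succ fa =>
      obtain ⟨hbox, hdv⟩ := hF (y, x, k) (by simp)
      have hgy : ¬ (y, x) = goal := hng (y, x, k) (by simp)
      have hdvn : dist.getD (pvNormA y H, pvNormA x W, k) (-1) = d := by
        rw [pvNorm_id y H hbox.1, pvNorm_id x W hbox.2.2.1]; exact hdv
      obtain ⟨adds₀, dist₁, h1, h2, h3, h4, h5⟩ :=
        pvPop grid key_pos H W y x k d hbox.2.2.2.2 hd0
          pvDirsA (F' ++ N) dist hdvn
      have hstep : pvLoopA grid goal key_pos H W (fa + 1) ((y, x, k) :: (F' ++ N)) dist =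
          pvLoopA grid goal key_pos H W fa ((F' ++ N) ++ adds₀) dist₁ := by
        simp [pvLoopA, hgy, h1]
      have hF' : ∀ t ∈ F', pvInBox H W t ∧ dist₁.getD t (-1) = d := by
        intro t ht
        obtain ⟨htb, htd⟩ := hF t (by simp [ht])
        refine ⟨htb, ?_⟩
        rw [h2 t, if_neg ?_]
        · exact htd
        · intro hta; have := (h3 t hta).1; omega
      obtain ⟨adds₁, dist₂, g1, g2, g3, g4, g5⟩ :=
        ih (N ++ adds₀) dist₁ fa (fun t ht => hng t (by simp [ht])) hF'
          (by simpa using Nat.le_of_succ_le_succ (by simpa using hfuel))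
      refine ⟨adds₀ ++ adds₁, dist₂, ?_, ?_, ?_, ?_, ?_⟩
      · rw [List.cons_append, hstep, List.append_assoc, g1]
        have : (fa + 1) - (F'.length + 1) = fa - F'.length := by omega
        simp only [List.length_cons, this, List.append_assoc]
      · intro t
        rw [g2 t]
        by_cases ht1 : t ∈ adds₁
        · simp [ht1]
        · rw [if_neg ht1, h2 t]
          by_cases ht0 : t ∈ adds₀
          · simp [ht0]
          · rw [if_neg ht0, if_neg (by simp [ht0, ht1])]
      · intro t ht
        rcases List.mem_append.mp ht with ht0 | ht1
        · obtain ⟨ha, hb, dd, hdd, hm⟩ := h3 t ht0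
          exact ⟨ha, hb, (y, x, k), by simp, dd, hdd, hm⟩
        · obtain ⟨ha, hb, s', hs', dd, hdd, hm⟩ := g3 t ht1
          have ht0 : t ∉ adds₀ := by
            intro hc
            rw [h2 t, if_pos hc] at ha; omega
          rw [h2 t, if_neg ht0] at ha
          exact ⟨ha, hb, s', by simp [hs'], dd, hdd, hm⟩
      · intro s' hs' dd hdd t hm
        rcases List.mem_cons.mp hs' with rfl | hs''
        · have := h4 dd hdd t hm
          rw [g2 t]
          by_cases ht1 : t ∈ adds₁
          · simp [ht1]; omega
          · rw [if_neg ht1]; exact this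
        · exact g4 s' hs'' dd hdd t hm
      · rw [List.length_append]; omega

-- when the goal cell lies outside the grid box and off the start, A's queue empties: -1
lemma pvLoopA_neg (grid : List String) (goal key_pos : Int × Int) (H W : Int)
    (hgb : ¬(0 ≤ goal.1 ∧ goal.1 < H ∧ 0 ≤ goal.2 ∧ goal.2 < W)) :
    ∀ (fuelA : Nat) (queue : List (Int × Int × Int))
      (dist : PySem.Dict (Int × Int × Int) Int),
    (∀ s ∈ queue, (s.1, s.2.1) ≠ goal ∧ (s.2.2 = 0 ∨ s.2.2 = 1) ∧
      0 ≤ dist.getD (pvNormA s.1 H, pvNormA s.2.1 W, s.2.2) (-1)) →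
    queue.length + 2 * pvFresh H W dist + 1 ≤ fuelA →
    pvLoopA grid goal key_pos H W fuelA queue dist = -1 := by
  intro fuelA
  induction fuelA with
  | zero =>
    intro queue dist _ hfuel
    omega
  | succ fa ih =>
    intro queue dist hq hfuel
    cases queue with
    | nil => rfl
    | cons s rest =>
      obtain ⟨y, x, k⟩ := s
      obtain ⟨hsg, hsk, hsv⟩ := hq (y, x, k) (by simp)
      dsimp only at hsg hsk hsv
      simp only [List.length_cons] at hfuel
      obtain ⟨adds, dist₂, h1, h2, h3, h4, h5⟩ :=
        pvPop grid key_pos H W y x k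
          (dist.getD (pvNormA y H, pvNormA x W, k) (-1)) hsk hsv
          pvDirsA rest dist rfl
      have hstep : pvLoopA grid goal key_pos H W (fa + 1) ((y, x, k) :: rest) dist =
          pvLoopA grid goal key_pos H W fa (rest ++ adds) dist₂ := by
        simp [pvLoopA, hsg, h1]
      rw [hstep]
      apply ih (rest ++ adds) dist₂
      · intro t ht
        rcases List.mem_append.mp ht with ht' | ht'
        · obtain ⟨h6, h7, h8⟩ := hq t (by simp [ht'])
          refine ⟨h6, h7, ?_⟩
          rw [h2]
          by_cases hta : (pvNormA t.1 H, pvNormA t.2.1 W, t.2.2) ∈ adds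
          · rw [if_pos hta]; omega
          · rw [if_neg hta]; exact h8
        · obtain ⟨_, htb, _⟩ := h3 t ht'
          refine ⟨?_, htb.2.2.2.2, ?_⟩
          · intro he
            apply hgb
            rw [← he]
            exact ⟨htb.1, htb.2.1, htb.2.2.1, htb.2.2.2.1⟩
          · rw [pvNorm_id t.1 H htb.1, pvNorm_id t.2.1 W htb.2.2.1]
            have hte : (t.1, t.2.1, t.2.2) = t := rfl
            rw [hte, h2 t, if_pos ht']
            omega
      · simp only [List.length_append]
        omega

-- B's per-direction step, rewritten through pvMove
lemma pvTryB_move_none (grid : List String) (key_pos : Int × Int) (H W y x k : Int)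
    (acc : PySem.Dict (Int × Int × Int) Bool × Bool) (dd : Int × Int)
    (h : pvMove grid key_pos H W (y, x, k) dd = none) :
    pvTryB grid key_pos H W y x k acc dd = acc := by
  simp only [pvMove] at h
  simp only [pvTryB]
  have hcell : pvCellB grid (y + dd.1) (x + dd.2) = pvCellA grid (y + dd.1) (x + dd.2) := rfl
  rw [hcell]
  by_cases hb : 0 ≤ y + dd.1 ∧ y + dd.1 < H ∧ 0 ≤ x + dd.2 ∧ x + dd.2 < W
  · rw [if_pos hb] at h ⊢
    by_cases h1 : pvCellA grid (y + dd.1) (x + dd.2) = 'D' ∧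
        (if (y + dd.1, x + dd.2) = key_pos then (1 : Int) else k) = 0
    · rw [if_neg (by tauto)]
    · rw [if_neg h1] at h
      by_cases h2 : pvCellA grid (y + dd.1) (x + dd.2) = '#'
      · rw [if_neg (by tauto)]
      · rw [if_neg h2] at h; cases h
  · rw [if_neg hb]

lemma pvTryB_move_some (grid : List String) (key_pos : Int × Int) (H W y x k : Int)
    (acc : PySem.Dict (Int × Int × Int) Bool × Bool) (dd : Int × Int)
    (t : Int × Int × Int)
    (h : pvMove grid key_pos H W (y, x, k) dd = some t) :
    pvTryB grid key_pos H W y x k acc dd =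
      (if acc.1.getD t false = false then (acc.1.insert t true, true) else acc) := by
  simp only [pvMove] at h
  simp only [pvTryB]
  have hcell : pvCellB grid (y + dd.1) (x + dd.2) = pvCellA grid (y + dd.1) (x + dd.2) := rfl
  rw [hcell]
  by_cases hb : 0 ≤ y + dd.1 ∧ y + dd.1 < H ∧ 0 ≤ x + dd.2 ∧ x + dd.2 < W
  · rw [if_pos hb] at h ⊢
    by_cases h1 : pvCellA grid (y + dd.1) (x + dd.2) = 'D' ∧
        (if (y + dd.1, x + dd.2) = key_pos then (1 : Int) else k) = 0
    · rw [if_pos h1] at h; cases h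
    · rw [if_neg h1] at h
      by_cases h2 : pvCellA grid (y + dd.1) (x + dd.2) = '#'
      · rw [if_pos h2] at h; cases h
      · rw [if_neg h2] at h
        cases h
        rw [if_pos (by tauto)]
  · rw [if_neg hb] at h; cases h

lemma pvDirsB_eq : pvDirsB = pvDirsA := rfl

-- expanding ONE reachable state over a direction list: new marks are exactly its fresh
-- reachable targets; the changed flag records whether anything fresh got marked
lemma pvDirsFoldB (grid : List String) (key_pos : Int × Int) (H W y x k : Int)
    (hk : k = 0 ∨ k = 1) :
    ∀ (L : List (Int × Int)) (nd : PySem.Dict (Int × Int × Int) Bool) (ch : Bool),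
    ∃ (nd₂ : PySem.Dict (Int × Int × Int) Bool) (ch₂ : Bool),
      L.foldl (pvTryB grid key_pos H W y x k) (nd, ch) = (nd₂, ch₂) ∧
      (∀ t, nd₂.getD t false = true ↔ (nd.getD t false = true ∨
        ∃ dd ∈ L, pvMove grid key_pos H W (y, x, k) dd = some t)) ∧
      (ch₂ = true ↔ (ch = true ∨ ∃ t, nd₂.getD t false = true ∧ nd.getD t false = false)) ∧
      (∀ t, nd₂.getD t false = true → nd.getD t false = true ∨ pvInBox H W t) := by
  intro L
  induction L with
  | nil =>
    intro nd ch
    refine ⟨nd, ch, rfl, by simp, ?_, fun t ht => Or.inl ht⟩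
    constructor
    · intro h; exact Or.inl h
    · rintro (h | ⟨t, h1, h2⟩)
      · exact h
      · rw [h1] at h2; cases h2
  | cons dd L ih =>
    intro nd ch
    rw [List.foldl_cons]
    cases hmv : pvMove grid key_pos H W (y, x, k) dd with
    | none =>
      rw [pvTryB_move_none grid key_pos H W y x k (nd, ch) dd hmv]
      obtain ⟨nd₂, ch₂, heq, m1, m2, m3⟩ := ih nd ch
      refine ⟨nd₂, ch₂, heq, ?_, m2, m3⟩
      intro t
      rw [m1 t]
      constructor
      · rintro (h | ⟨dd', hdd', hm⟩)
        · exact Or.inl h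
        · exact Or.inr ⟨dd', by simp [hdd'], hm⟩
      · rintro (h | ⟨dd', hdd', hm⟩)
        · exact Or.inl h
        · rcases List.mem_cons.mp hdd' with rfl | hdd''
          · rw [hmv] at hm; cases hm
          · exact Or.inr ⟨dd', hdd'', hm⟩
    | some u =>
      rw [pvTryB_move_some grid key_pos H W y x k (nd, ch) dd u hmv]
      by_cases hgu : nd.getD u false = false
      · rw [if_pos hgu]
        obtain ⟨nd₂, ch₂, heq, m1, m2, m3⟩ := ih (nd.insert u true) true
        have hgd : ∀ t, (nd.insert u true).getD t false =
            if t = u then true else nd.getD t false := by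
          intro t; rw [PySem.Dict.getD_insert]
        have hnd₂u : nd₂.getD u false = true :=
          (m1 u).mpr (Or.inl (by rw [hgd, if_pos rfl]))
        refine ⟨nd₂, ch₂, heq, ?_, ?_, ?_⟩
        · intro t
          rw [m1 t]
          constructor
          · rintro (hi | ⟨dd', hdd', hm⟩)
            · rw [hgd] at hi
              by_cases htu : t = u
              · exact Or.inr ⟨dd, by simp, by rw [htu]; exact hmv⟩
              · rw [if_neg htu] at hi; exact Or.inl hi
            · exact Or.inr ⟨dd', by simp [hdd'], hm⟩
          · rintro (hn | ⟨dd', hdd', hm⟩)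
            · refine Or.inl ?_
              rw [hgd]
              by_cases htu : t = u
              · rw [if_pos htu]
              · rw [if_neg htu]; exact hn
            · rcases List.mem_cons.mp hdd' with rfl | hdd''
              · rw [hmv] at hm; cases hm
                exact Or.inl (by rw [hgd, if_pos rfl])
              · exact Or.inr ⟨dd', hdd'', hm⟩
        · have hch₂ : ch₂ = true := (m2).mpr (Or.inl rfl)
          rw [hch₂]
          constructor
          · intro _; exact Or.inr ⟨u, hnd₂u, hgu⟩
          · intro _; rfl
        · intro t ht
          rcases m3 t ht with hi | hbx
          · rw [hgd] at hi
            by_cases htu : t = u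
            · exact Or.inr (by rw [htu]; exact pvMove_inBox hmv hk)
            · rw [if_neg htu] at hi; exact Or.inl hi
          · exact Or.inr hbx
      · rw [if_neg hgu]
        have hgu' : nd.getD u false = true := by
          cases hval : nd.getD u false
          · exact absurd hval hgu
          · rfl
        obtain ⟨nd₂, ch₂, heq, m1, m2, m3⟩ := ih nd ch
        refine ⟨nd₂, ch₂, heq, ?_, m2, m3⟩
        intro t
        rw [m1 t]
        constructor
        · rintro (h | ⟨dd', hdd', hm⟩)
          · exact Or.inl h
          · exact Or.inr ⟨dd', by simp [hdd'], hm⟩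
        · rintro (h | ⟨dd', hdd', hm⟩)
          · exact Or.inl h
          · rcases List.mem_cons.mp hdd' with rfl | hdd''
            · rw [hmv] at hm; cases hm; exact Or.inl hgu'
            · exact Or.inr ⟨dd', hdd'', hm⟩

-- one whole sweep over a list of candidate source states, reading the FIXED table rb
lemma pvSweepFoldB (grid : List String) (key_pos : Int × Int) (H W : Int)
    (rb : PySem.Dict (Int × Int × Int) Bool) :
    ∀ (S : List (Int × Int × Int)), (∀ s ∈ S, s.2.2 = 0 ∨ s.2.2 = 1) →
    ∀ (nd : PySem.Dict (Int × Int × Int) Bool) (ch : Bool),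
    ∃ (nd₂ : PySem.Dict (Int × Int × Int) Bool) (ch₂ : Bool),
      S.foldl (fun acc s => pvVisitB grid key_pos H W rb acc s.1 s.2.1 s.2.2) (nd, ch) =
        (nd₂, ch₂) ∧
      (∀ t, nd₂.getD t false = true ↔ (nd.getD t false = true ∨
        ∃ s ∈ S, rb.getD s false = true ∧
          ∃ dd ∈ pvDirsB, pvMove grid key_pos H W s dd = some t)) ∧
      (ch₂ = true ↔ (ch = true ∨ ∃ t, nd₂.getD t false = true ∧ nd.getD t false = false)) ∧
      (∀ t, nd₂.getD t false = true → nd.getD t false = true ∨ pvInBox H W t) := by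
  intro S
  induction S with
  | nil =>
    intro _ nd ch
    refine ⟨nd, ch, rfl, by simp, ?_, fun t ht => Or.inl ht⟩
    constructor
    · intro h; exact Or.inl h
    · rintro (h | ⟨t, h1, h2⟩)
      · exact h
      · rw [h1] at h2; cases h2
  | cons s S ih =>
    intro hS nd ch
    rw [List.foldl_cons]
    have hse : (s.1, s.2.1, s.2.2) = s := rfl
    by_cases hms : rb.getD (s.1, s.2.1, s.2.2) false = true
    · rw [show pvVisitB grid key_pos H W rb (nd, ch) s.1 s.2.1 s.2.2 =
          pvDirsB.foldl (pvTryB grid key_pos H W s.1 s.2.1 s.2.2) (nd, ch) from by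
        unfold pvVisitB; rw [if_pos hms]]
      obtain ⟨nd₁, ch₁, heq1, m1, m2, m3⟩ :=
        pvDirsFoldB grid key_pos H W s.1 s.2.1 s.2.2 (hS s (by simp)) pvDirsB nd ch
      rw [heq1]
      obtain ⟨nd₂, ch₂, heq2, n1, n2, n3⟩ := ih (fun t ht => hS t (by simp [ht])) nd₁ ch₁
      have hmono1 : ∀ t, nd.getD t false = true → nd₁.getD t false = true :=
        fun t ht => (m1 t).mpr (Or.inl ht)
      have hmono2 : ∀ t, nd₁.getD t false = true → nd₂.getD t false = true :=
        fun t ht => (n1 t).mpr (Or.inl ht)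
      refine ⟨nd₂, ch₂, heq2, ?_, ?_, ?_⟩
      · intro t
        rw [n1 t]
        constructor
        · rintro (h1 | ⟨s', hs', hrb', dd', hdd', hm⟩)
          · rcases (m1 t).mp h1 with h | ⟨dd, hdd, hm⟩
            · exact Or.inl h
            · exact Or.inr ⟨s, by simp, by rw [hse] at hms; exact hms,
                dd, by rw [pvDirsB_eq] at hdd ⊢; exact hdd, by rw [hse] at hm; exact hm⟩
          · exact Or.inr ⟨s', by simp [hs'], hrb', dd', hdd', hm⟩
        · rintro (h | ⟨s', hs', hrb', dd', hdd', hm⟩)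
          · exact Or.inl (hmono1 t h)
          · rcases List.mem_cons.mp hs' with rfl | hs''
            · exact Or.inl ((m1 t).mpr (Or.inr ⟨dd', by rw [pvDirsB_eq] at hdd'; exact hdd',
                by rw [hse]; exact hm⟩))
            · exact Or.inr ⟨s', hs'', hrb', dd', hdd', hm⟩
      · rw [n2, m2]
        constructor
        · rintro ((h | ⟨t, ht1, ht2⟩) | ⟨t, ht1, ht2⟩)
          · exact Or.inl h
          · exact Or.inr ⟨t, hmono2 t ht1, ht2⟩
          · refine Or.inr ⟨t, ht1, ?_⟩
            cases hval : nd.getD t false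
            · rfl
            · exact absurd (hmono1 t hval) (by rw [ht2]; simp)
        · rintro (h | ⟨t, ht1, ht2⟩)
          · exact Or.inl (Or.inl h)
          · cases hval : nd₁.getD t false
            · exact Or.inr ⟨t, ht1, hval⟩
            · exact Or.inl (Or.inr ⟨t, hval, ht2⟩)
      · intro t ht
        rcases n3 t ht with h1 | hbx
        · rcases m3 t h1 with h | hbx
          · exact Or.inl h
          · exact Or.inr hbx
        · exact Or.inr hbx
    · rw [show pvVisitB grid key_pos H W rb (nd, ch) s.1 s.2.1 s.2.2 = (nd, ch) from by
        unfold pvVisitB; rw [if_neg hms]]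
      obtain ⟨nd₂, ch₂, heq2, n1, n2, n3⟩ := ih (fun t ht => hS t (by simp [ht])) nd ch
      refine ⟨nd₂, ch₂, heq2, ?_, n2, n3⟩
      intro t
      rw [n1 t]
      constructor
      · rintro (h | ⟨s', hs', hrb', hrest⟩)
        · exact Or.inl h
        · exact Or.inr ⟨s', by simp [hs'], hrb', hrest⟩
      · rintro (h | ⟨s', hs', hrb', hrest⟩)
        · exact Or.inl h
        · rcases List.mem_cons.mp hs' with rfl | hs''
          · rw [hse] at hms; exact absurd hrb' hms
          · exact Or.inr ⟨s', hs'', hrb', hrest⟩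

-- the sweep's python ranges enumerate exactly the states of pvBox
lemma pv_box_bits (H W : Int) : ∀ s ∈ pvBox H W, s.2.2 = 0 ∨ s.2.2 = 1 := by
  intro s hs
  unfold pvBox at hs
  obtain ⟨y, _, hs⟩ := List.mem_flatMap.mp hs
  obtain ⟨x, _, hs⟩ := List.mem_flatMap.mp hs
  simp only [List.mem_cons, List.not_mem_nil, or_false] at hs
  rcases hs with h | h
  · rw [h]; exact Or.inl rfl
  · rw [h]; exact Or.inr rfl

lemma pvSweep_eq (grid : List String) (key_pos : Int × Int) (m n : Nat)
    (rb : PySem.Dict (Int × Int × Int) Bool) :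
    pvSweepB grid key_pos (m : Int) (n : Int) rb =
      (pvBox (m : Int) (n : Int)).foldl
        (fun acc t => pvVisitB grid key_pos (m : Int) (n : Int) rb acc t.1 t.2.1 t.2.2)
        (rb, false) := by
  have hr : ∀ (k : Nat), PySem.List.pyRange 0 (k : Int) 1 =
      (List.range k).map (fun j : Nat => (j : Int)) := by
    intro k; rw [PySem.List.pyRange_one]; simp
  unfold pvSweepB pvBox
  rw [Int.toNat_natCast, Int.toNat_natCast, hr m, List.foldl_map, List.foldl_flatMap]
  refine PySem.List.foldl_congr_mem _ _ _ _ (fun acc y _ => ?_)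
  rw [hr n, List.foldl_map, List.foldl_flatMap]
  refine PySem.List.foldl_congr_mem _ _ _ _ (fun acc' x _ => ?_)
  simp only [List.foldl_cons, List.foldl_nil]

-- the goal test scans exactly the reachable in-box states
lemma pvGoalHit_iff (goal : Int × Int) (H W : Int)
    (rb : PySem.Dict (Int × Int × Int) Bool)
    (hin : ∀ t, rb.getD t false = true → pvInBox H W t) :
    pvGoalHitB goal H W rb = true ↔
      ∃ t, rb.getD t false = true ∧ (t.1, t.2.1) = goal := by
  unfold pvGoalHitB
  rw [List.any_eq_true]
  constructor
  · rintro ⟨y, _, hy⟩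
    rw [List.any_eq_true] at hy
    obtain ⟨x, _, hx⟩ := hy
    rw [Bool.and_eq_true, decide_eq_true_iff, Bool.or_eq_true] at hx
    obtain ⟨hg, hm⟩ := hx
    rcases hm with hm | hm
    · exact ⟨(y, x, 0), hm, hg⟩
    · exact ⟨(y, x, 1), hm, hg⟩
  · rintro ⟨t, hm, hg⟩
    have hb := hin t hm
    refine ⟨t.1, PySem.List.mem_pyRange_one.mpr ⟨hb.1, hb.2.1⟩, ?_⟩
    rw [List.any_eq_true]
    refine ⟨t.2.1, PySem.List.mem_pyRange_one.mpr ⟨hb.2.2.1, hb.2.2.2.1⟩, ?_⟩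
    rw [Bool.and_eq_true, decide_eq_true_iff, Bool.or_eq_true]
    refine ⟨hg, ?_⟩
    rcases hb.2.2.2.2 with hk | hk
    · left
      rw [show ((t.1, t.2.1, (0 : Int))) = t from by rw [← hk]]
      exact hm
    · right
      rw [show ((t.1, t.2.1, (1 : Int))) = t from by rw [← hk]]
      exact hm

-- unmarked-cell count: the fuel measure of B's loop
def pvDark (H W : Int) (rb : PySem.Dict (Int × Int × Int) Bool) : Nat :=
  (pvBox H W).countP (fun t => rb.getD t false == false)

lemma pvDark_lt (H W : Int) (nd nd₂ : PySem.Dict (Int × Int × Int) Bool)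
    (hmono : ∀ t, nd.getD t false = true → nd₂.getD t false = true)
    (t : Int × Int × Int) (hbox : t ∈ pvBox H W)
    (hnew : nd₂.getD t false = true) (hold : nd.getD t false = false) :
    pvDark H W nd₂ < pvDark H W nd := by
  apply pv_countP_lt (pvBox H W) _ _ _ t hbox
  · simp [hold]
  · simp [hnew]
  · intro u _ hq
    rw [beq_iff_eq] at hq ⊢
    cases hval : nd.getD u false
    · rfl
    · exact absurd (hmono u hval) (by rw [hq]; simp)

-- when the goal cell lies outside the grid box, B's table saturates: -1
lemma pvLoopB_neg (grid : List String) (goal key_pos : Int × Int) (m n : Nat)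
    (hgb : ¬(0 ≤ goal.1 ∧ goal.1 < (m : Int) ∧ 0 ≤ goal.2 ∧ goal.2 < (n : Int))) :
    ∀ (fuelB : Nat) (rb : PySem.Dict (Int × Int × Int) Bool) (d : Int),
    (∀ t, rb.getD t false = true → pvInBox (m : Int) (n : Int) t) →
    pvDark (m : Int) (n : Int) rb + 2 ≤ fuelB →
    pvLoopB grid goal key_pos (m : Int) (n : Int) fuelB rb d = -1 := by
  intro fuelB
  induction fuelB with
  | zero =>
    intro rb d _ hfuel
    omega
  | succ fb ih =>
    intro rb d hin hfuel
    have hhit : pvGoalHitB goal (m : Int) (n : Int) rb = false := by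
      cases hval : pvGoalHitB goal (m : Int) (n : Int) rb
      · rfl
      · exfalso
        obtain ⟨t, hm, hg⟩ := (pvGoalHit_iff goal (m : Int) (n : Int) rb hin).mp hval
        have hb := hin t hm
        exact hgb (by rw [← hg]; exact ⟨hb.1, hb.2.1, hb.2.2.1, hb.2.2.2.1⟩)
    obtain ⟨nd₂, ch₂, heq, n1, n2, n3⟩ :=
      pvSweepFoldB grid key_pos (m : Int) (n : Int) rb
        (pvBox (m : Int) (n : Int)) (pv_box_bits _ _) rb false
    have hsw : pvSweepB grid key_pos (m : Int) (n : Int) rb = (nd₂, ch₂) := by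
      rw [pvSweep_eq]; exact heq
    cases hch : ch₂ with
    | false =>
      simp only [pvLoopB, hhit, Bool.false_eq_true, if_false, hsw, hch, if_true]
    | true =>
      have hB : pvLoopB grid goal key_pos (m : Int) (n : Int) (fb + 1) rb d =
          pvLoopB grid goal key_pos (m : Int) (n : Int) fb nd₂ (d + 1) := by
        simp only [pvLoopB, hhit, Bool.false_eq_true, if_false, hsw, hch,
          Bool.true_eq_false, if_false]
      rw [hB]
      obtain ⟨t, ht1, ht2⟩ := (n2).mp hch |>.resolve_left (by simp)
      have hmono : ∀ u, rb.getD u false = true → nd₂.getD u false = true :=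
        fun u hu => (n1 u).mpr (Or.inl hu)
      have htbox : pvInBox (m : Int) (n : Int) t := by
        rcases n3 t ht1 with h | h
        · rw [h] at ht2; cases ht2
        · exact h
      have hlt : pvDark (m : Int) (n : Int) nd₂ < pvDark (m : Int) (n : Int) rb :=
        pvDark_lt _ _ rb nd₂ hmono t
          (pv_mem_box htbox.1 htbox.2.1 htbox.2.2.1 htbox.2.2.2.1 htbox.2.2.2.2) ht1 ht2
      apply ih nd₂ (d + 1)
      · intro u hu
        rcases n3 u hu with h | h
        · exact hin u h
        · exact h
      · omega

-- the simulation: A's queue loop at a layer boundary against B's sweep loop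
lemma pvSim (grid : List String) (goal key_pos : Int × Int) (m n : Nat) :
    ∀ (fuelB : Nat) (rb : PySem.Dict (Int × Int × Int) Bool)
      (dist : PySem.Dict (Int × Int × Int) Int) (F : List (Int × Int × Int))
      (fuelA : Nat) (d : Int),
    (∀ t, rb.getD t false = true ↔ dist.getD t (-1) ≠ -1) →
    (∀ s ∈ F, pvInBox (m : Int) (n : Int) s ∧ dist.getD s (-1) = d) →
    (∀ t, rb.getD t false = true → t ∉ F → (t.1, t.2.1) ≠ goal) →
    (∀ s, rb.getD s false = true → s ∉ F → ∀ dd ∈ pvDirsA, ∀ t,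
      pvMove grid key_pos (m : Int) (n : Int) s dd = some t → rb.getD t false = true) →
    (∀ t, rb.getD t false = true → pvInBox (m : Int) (n : Int) t) →
    0 ≤ d →
    F.length + 2 * pvFresh (m : Int) (n : Int) dist + 1 ≤ fuelA →
    pvFresh (m : Int) (n : Int) dist + 2 ≤ fuelB →
    pvLoopA grid goal key_pos (m : Int) (n : Int) fuelA F dist =
      pvLoopB grid goal key_pos (m : Int) (n : Int) fuelB rb d := by
  intro fuelB
  induction fuelB with
  | zero =>
    intro rb dist F fuelA d _ _ _ _ _ _ _ hfB
    omega
  | succ fb ih =>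
    intro rb dist F fuelA d hJ1 hI3 hJ4 hJ5 hJ6 hd0 hfA hfB
    by_cases hg : ∃ g ∈ F, (g.1, g.2.1) = goal
    · obtain ⟨g, hgF, hgg⟩ := hg
      have hgm : rb.getD g false = true :=
        (hJ1 g).mpr (by rw [(hI3 g hgF).2]; omega)
      have hhit : pvGoalHitB goal (m : Int) (n : Int) rb = true :=
        (pvGoalHit_iff goal (m : Int) (n : Int) rb hJ6).mpr ⟨g, hgm, hgg⟩
      have hB : pvLoopB grid goal key_pos (m : Int) (n : Int) (fb + 1) rb d = d := by
        simp [pvLoopB, hhit]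
      rw [hB, ← List.append_nil F]
      exact pvLayerGoal grid goal key_pos (m : Int) (n : Int) d hd0 F [] dist fuelA
        ⟨g, hgF, hgg⟩ hI3 (by omega)
    · push Not at hg
      have hnog : ∀ t, rb.getD t false = true → (t.1, t.2.1) ≠ goal := by
        intro t ht
        by_cases htF : t ∈ F
        · exact hg t htF
        · exact hJ4 t ht htF
      have hhit : pvGoalHitB goal (m : Int) (n : Int) rb = false := by
        cases hval : pvGoalHitB goal (m : Int) (n : Int) rb
        · rfl
        · obtain ⟨t, hm, hgoal⟩ :=
            (pvGoalHit_iff goal (m : Int) (n : Int) rb hJ6).mp hval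
          exact absurd hgoal (hnog t hm)
      obtain ⟨adds, dist₂, h1, h2, h3, h4, h5⟩ :=
        pvLayerStep grid goal key_pos (m : Int) (n : Int) d hd0 F [] dist fuelA hg hI3
          (by omega)
      rw [List.append_nil] at h1
      rw [List.nil_append] at h1
      obtain ⟨nd₂, ch₂, heq, n1, n2, n3⟩ :=
        pvSweepFoldB grid key_pos (m : Int) (n : Int) rb
          (pvBox (m : Int) (n : Int)) (pv_box_bits _ _) rb false
      have hsw : pvSweepB grid key_pos (m : Int) (n : Int) rb = (nd₂, ch₂) := by
        rw [pvSweep_eq]; exact heq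
      have hmemnxt : ∀ t, nd₂.getD t false = true ↔ dist₂.getD t (-1) ≠ -1 := by
        intro t
        rw [n1 t]
        constructor
        · rintro (h | ⟨s, _, hrb, dd, hdd, hm⟩)
          · rw [h2 t]
            by_cases hta : t ∈ adds
            · simp [hta]; omega
            · rw [if_neg hta]; exact (hJ1 t).mp h
          · rw [pvDirsB_eq] at hdd
            by_cases hsF : s ∈ F
            · exact h4 s hsF dd hdd t hm
            · have := hJ5 s hrb hsF dd hdd t hm
              rw [h2 t]
              by_cases hta : t ∈ adds
              · simp [hta]; omega
              · rw [if_neg hta]; exact (hJ1 t).mp this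
        · intro hne
          rw [h2 t] at hne
          by_cases hta : t ∈ adds
          · obtain ⟨_, _, s, hsF, dd, hdd, hm⟩ := h3 t hta
            have hsm : rb.getD s false = true :=
              (hJ1 s).mpr (by rw [(hI3 s hsF).2]; omega)
            have hsbox : s ∈ pvBox (m : Int) (n : Int) := by
              have hb := (hI3 s hsF).1
              exact pv_mem_box hb.1 hb.2.1 hb.2.2.1 hb.2.2.2.1 hb.2.2.2.2
            exact Or.inr ⟨s, hsbox, hsm, dd, by rw [pvDirsB_eq]; exact hdd, hm⟩
          · rw [if_neg hta] at hne
            exact Or.inl ((hJ1 t).mpr hne)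
      cases hch : ch₂ with
      | false =>
        have haddsnil : adds = [] := by
          cases hadds : adds with
          | nil => rfl
          | cons a as =>
            exfalso
            have ha : a ∈ adds := by rw [hadds]; simp
            have hand : nd₂.getD a false = true := by
              rw [hmemnxt a, h2 a, if_pos ha]; omega
            have hnew : rb.getD a false = false := by
              cases hval : rb.getD a false
              · rfl
              · exfalso
                have h6 := (hJ1 a).mp hval
                have h7 := (h3 a ha).1
                omega
            have hcontra : ch₂ = true := n2.mpr (Or.inr ⟨a, hand, hnew⟩)
            rw [hch] at hcontra
            cases hcontra
        have hB : pvLoopB grid goal key_pos (m : Int) (n : Int) (fb + 1) rb d = -1 := by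
          simp only [pvLoopB, hhit, Bool.false_eq_true, if_false, hsw, hch, if_true]
        rw [hB, h1, haddsnil]
        cases (fuelA - F.length) <;> rfl
      | true =>
        have haddsne : adds ≠ [] := by
          intro hnil
          obtain ⟨t, ht1, ht2⟩ := (n2).mp hch |>.resolve_left (by simp)
          have := (hmemnxt t).mp ht1
          rw [h2 t, hnil] at this
          rw [if_neg (List.not_mem_nil)] at this
          exact absurd ((hJ1 t).mpr this) (by rw [ht2]; simp)
        have hB : pvLoopB grid goal key_pos (m : Int) (n : Int) (fb + 1) rb d =
            pvLoopB grid goal key_pos (m : Int) (n : Int) fb nd₂ (d + 1) := by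
          simp only [pvLoopB, hhit, Bool.false_eq_true, if_false, hsw, hch,
            Bool.true_eq_false, if_false]
        rw [hB, h1]
        have hlen : 1 ≤ adds.length := by
          cases adds with
          | nil => exact absurd rfl haddsne
          | cons a as => simp
        apply ih nd₂ dist₂ adds (fuelA - F.length) (d + 1)
        · intro t
          exact hmemnxt t
        · intro t ht
          exact ⟨(h3 t ht).2.1, by rw [h2 t, if_pos ht]⟩
        · intro t ht htna
          have hdne := (hmemnxt t).mp ht
          rw [h2 t, if_neg htna] at hdne
          exact hnog t ((hJ1 t).mpr hdne)
        · intro s hs hsna dd hdd t hm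
          have hdne := (hmemnxt s).mp hs
          rw [h2 s, if_neg hsna] at hdne
          have hsrb : rb.getD s false = true := (hJ1 s).mpr hdne
          by_cases hsF : s ∈ F
          · rw [hmemnxt t]
            exact h4 s hsF dd hdd t hm
          · have := hJ5 s hsrb hsF dd hdd t hm
            exact (n1 t).mpr (Or.inl this)
        · intro t ht
          have hdne := (hmemnxt t).mp ht
          rw [h2 t] at hdne
          by_cases hta : t ∈ adds
          · exact (h3 t hta).2.1
          · rcases n3 t ht with h | h
            · exact hJ6 t h
            · exact h
        · omega
        · omega
        · omega

-- ===== VERDICT (by name: the statement is the Claim_ definition above) =====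
theorem maze_with_key_spec : Claim_equal_maze_with_key := by
  intro grid start goal key_pos _ hpre
  obtain ⟨hH, hW, hrect, hs1a, hs1b, hs2a, hs2b, hcase⟩ := hpre
  unfold Spec_maze_with_key
  show pvLoopA grid goal key_pos (grid.length : Int) ((grid.headD "").length : Int)
      (4 * grid.length * (grid.headD "").length + 2)
      [(start.1, start.2, 0)]
      ((PySem.Dict.empty : PySem.Dict (Int × Int × Int) Int).insert
        (pvNormA start.1 (grid.length : Int), pvNormA start.2 ((grid.headD "").length : Int), 0) 0) =
    pvLoopB grid goal key_pos (grid.length : Int) ((grid.headD "").length : Int)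
      (2 * grid.length * (grid.headD "").length + 2)
      ((PySem.Dict.empty : PySem.Dict (Int × Int × Int) Bool).insert
        (pvNormA start.1 (grid.length : Int), pvNormA start.2 ((grid.headD "").length : Int), 0) true) 0
  have hgd0 : ∀ t : Int × Int × Int,
      ((PySem.Dict.empty : PySem.Dict (Int × Int × Int) Int).insert
        (pvNormA start.1 (grid.length : Int), pvNormA start.2 ((grid.headD "").length : Int), 0) 0).getD t (-1) =
        if t = (pvNormA start.1 (grid.length : Int),
            pvNormA start.2 ((grid.headD "").length : Int), 0) then 0 else -1 := by
    intro t
    rw [PySem.Dict.getD_insert]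
    split_ifs <;> simp [PySem.Dict.getD_empty]
  have hrb0 : ∀ t : Int × Int × Int,
      ((PySem.Dict.empty : PySem.Dict (Int × Int × Int) Bool).insert
        (pvNormA start.1 (grid.length : Int), pvNormA start.2 ((grid.headD "").length : Int), 0) true).getD t false =
        if t = (pvNormA start.1 (grid.length : Int),
            pvNormA start.2 ((grid.headD "").length : Int), 0) then true else false := by
    intro t
    rw [PySem.Dict.getD_insert]
    split_ifs <;> simp [PySem.Dict.getD_empty]
  have hfresh0 : pvFresh (grid.length : Int) ((grid.headD "").length : Int)
      ((PySem.Dict.empty : PySem.Dict (Int × Int × Int) Int).insert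
        (pvNormA start.1 (grid.length : Int), pvNormA start.2 ((grid.headD "").length : Int), 0) 0) ≤
      2 * (grid.length * (grid.headD "").length) := by
    calc pvFresh (grid.length : Int) ((grid.headD "").length : Int) _
        ≤ (pvBox (grid.length : Int) ((grid.headD "").length : Int)).length :=
          List.countP_le_length
      _ = 2 * (grid.length * (grid.headD "").length) := by
          rw [pv_box_length, Int.toNat_natCast, Int.toNat_natCast]
  have h4e : 4 * grid.length * (grid.headD "").length =
      2 * (2 * (grid.length * (grid.headD "").length)) := by ring
  have h2e : 2 * grid.length * (grid.headD "").length =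
      2 * (grid.length * (grid.headD "").length) := by ring
  by_cases hpos : 0 ≤ start.1 ∧ 0 ≤ start.2
  · -- in-box start: the layer-by-layer simulation
    rw [pvNorm_id start.1 (grid.length : Int) hpos.1,
      pvNorm_id start.2 ((grid.headD "").length : Int) hpos.2] at hgd0 hrb0 hfresh0 ⊢
    apply pvSim grid goal key_pos grid.length (grid.headD "").length
      (2 * grid.length * (grid.headD "").length + 2)
      ((PySem.Dict.empty : PySem.Dict (Int × Int × Int) Bool).insert (start.1, start.2, 0) true)
      ((PySem.Dict.empty : PySem.Dict (Int × Int × Int) Int).insert (start.1, start.2, 0) 0)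
      [(start.1, start.2, 0)]
      (4 * grid.length * (grid.headD "").length + 2) 0
    · intro t
      rw [hgd0 t, hrb0 t]
      by_cases ht : t = (start.1, start.2, 0) <;> simp [ht]
    · intro s hs
      simp only [List.mem_singleton] at hs
      subst hs
      exact ⟨⟨hpos.1, hs1b, hpos.2, hs2b, Or.inl rfl⟩, by rw [hgd0, if_pos rfl]⟩
    · intro t ht htF
      rw [hrb0 t] at ht
      by_cases hts : t = (start.1, start.2, 0)
      · exact absurd (by rw [hts]; exact List.mem_singleton.mpr rfl) htF
      · rw [if_neg hts] at ht; cases ht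
    · intro s hs hsF
      rw [hrb0 s] at hs
      by_cases hss : s = (start.1, start.2, 0)
      · exact absurd (by rw [hss]; exact List.mem_singleton.mpr rfl) hsF
      · rw [if_neg hss] at hs; cases hs
    · intro t ht
      rw [hrb0 t] at ht
      by_cases hts : t = (start.1, start.2, 0)
      · rw [hts]
        exact ⟨hpos.1, hs1b, hpos.2, hs2b, Or.inl rfl⟩
      · rw [if_neg hts] at ht; cases ht
    · omega
    · simp only [List.length_singleton, h4e]
      omega
    · rw [h2e]
      omega
  · -- wrapped start: Pre_ puts the goal outside the grid box and off the start: both -1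
    rcases hcase with hp | ⟨hgb, hgs⟩
    · exact absurd hp hpos
    · have hnormbox : pvInBox (grid.length : Int) ((grid.headD "").length : Int)
          (pvNormA start.1 (grid.length : Int), pvNormA start.2 ((grid.headD "").length : Int), 0) := by
        unfold pvNormA
        refine ⟨?_, ?_, ?_, ?_, Or.inl rfl⟩ <;> dsimp only <;> split_ifs <;> omega
      have hA := pvLoopA_neg grid goal key_pos (grid.length : Int) ((grid.headD "").length : Int)
        hgb (4 * grid.length * (grid.headD "").length + 2)
        [(start.1, start.2, 0)]
        ((PySem.Dict.empty : PySem.Dict (Int × Int × Int) Int).insert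
          (pvNormA start.1 (grid.length : Int), pvNormA start.2 ((grid.headD "").length : Int), 0) 0)
        (by
          intro s hs
          simp only [List.mem_singleton] at hs
          subst hs
          refine ⟨?_, Or.inl rfl, ?_⟩
          · intro he
            exact hgs (by rw [← he])
          · rw [hgd0, if_pos rfl])
        (by simp only [List.length_singleton, h4e]; omega)
      have hdark0 : pvDark (grid.length : Int) ((grid.headD "").length : Int)
          ((PySem.Dict.empty : PySem.Dict (Int × Int × Int) Bool).insert
            (pvNormA start.1 (grid.length : Int), pvNormA start.2 ((grid.headD "").length : Int), 0) true) ≤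
          2 * (grid.length * (grid.headD "").length) := by
        calc pvDark (grid.length : Int) ((grid.headD "").length : Int) _
            ≤ (pvBox (grid.length : Int) ((grid.headD "").length : Int)).length :=
              List.countP_le_length
          _ = 2 * (grid.length * (grid.headD "").length) := by
              rw [pv_box_length, Int.toNat_natCast, Int.toNat_natCast]
      have hB := pvLoopB_neg grid goal key_pos grid.length (grid.headD "").length hgb
        (2 * grid.length * (grid.headD "").length + 2)
        ((PySem.Dict.empty : PySem.Dict (Int × Int × Int) Bool).insert
          (pvNormA start.1 (grid.length : Int), pvNormA start.2 ((grid.headD "").length : Int), 0) true) 0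
        (by
          intro t ht
          rw [hrb0 t] at ht
          by_cases hts : t = (pvNormA start.1 (grid.length : Int),
              pvNormA start.2 ((grid.headD "").length : Int), 0)
          · rw [hts]; exact hnormbox
          · rw [if_neg hts] at ht; cases ht)
        (by rw [h2e]; omega)
      rw [hA, hB]
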